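-- pv_equiv track=rewrite | github.com/sosomalouf0606-hue/EP2---Maria-Sofia-e-Mariana-Yunes | EP2/funcoes.py | calcula_pontos_quadra
-- ===== SOURCE A (Python) =====
-- def calcula_pontos_quadra(dados_rolados):
--     i = 0
--     while i < len(dados_rolados):
--         contador = 0
--         dado = dados_rolados[i]
--         k = 0
--         while k < len(dados_rolados):
--             if dados_rolados[k] == dado:
--                 contador += 1
--             k += 1
--         if contador >= 4:
--             soma = 0
--             j = 0
--             while j < len(dados_rolados):
--                 soma += dados_rolados[j]
--                 j += 1
--             return soma
--         i += 1
--     return 0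
-- ===== SOURCE B (Python) =====
-- def calcula_pontos_quadra(dados_rolados):
--     ordenados = sorted(dados_rolados)
--     run = 1
--     for idx in range(1, len(ordenados)):
--         if ordenados[idx] == ordenados[idx - 1]:
--             run += 1
--             if run >= 4:
--                 return sum(dados_rolados)
--         else:
--             run = 1
--     return 0
-- ===== Notes on version B (the rewrite author's own statement) =====
-- stated objective: faster
-- what changed: Replaces the quadratic nested per-index counting scan with sort-then-single-pass run-length detection on a sorted copy.
import Mathlib
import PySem

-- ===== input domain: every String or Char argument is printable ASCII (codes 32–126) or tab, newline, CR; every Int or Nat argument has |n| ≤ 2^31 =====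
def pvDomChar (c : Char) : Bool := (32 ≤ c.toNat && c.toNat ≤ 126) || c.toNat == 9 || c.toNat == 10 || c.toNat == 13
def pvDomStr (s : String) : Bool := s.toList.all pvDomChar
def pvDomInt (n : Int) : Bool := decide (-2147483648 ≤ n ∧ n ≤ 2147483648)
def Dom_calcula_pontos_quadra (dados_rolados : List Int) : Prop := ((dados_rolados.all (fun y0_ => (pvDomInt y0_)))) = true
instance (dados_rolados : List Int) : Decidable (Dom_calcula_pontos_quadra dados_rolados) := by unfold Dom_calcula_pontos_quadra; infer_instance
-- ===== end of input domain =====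

-- B replaces A's quadratic nested per-index counting scan by sort + one run-length pass (faster).

-- ===== PORT A =====
-- inner 'while k' counting loop
def pvCountLoop (dados_rolados : List Int) (dado : Int) : Int :=
  dados_rolados.foldl (fun contador v => if v == dado then contador + 1 else contador) 0

-- inner 'while j' summing loop
def pvSumLoop (dados_rolados : List Int) : Int :=
  dados_rolados.foldl (fun soma v => soma + v) 0

-- outer 'while i' loop: iterates dados_rolados[i] in order
def pvAOuter (dados_rolados : List Int) : List Int → Int
  | [] => 0
  | dado :: rest =>
    if 4 ≤ pvCountLoop dados_rolados dado then pvSumLoop dados_rolados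
    else pvAOuter dados_rolados rest

def calcula_pontos_quadra (dados_rolados : List Int) : Int :=
  pvAOuter dados_rolados dados_rolados

-- ===== PORT B =====
-- the 'for idx in range(1, len(ordenados))' run-length pass: prev = ordenados[idx-1]
def pvRunScan : Int → Int → List Int → Bool
  | _, _, [] => false
  | prev, run, v :: rest =>
    if v == prev then
      if 4 ≤ run + 1 then true else pvRunScan v (run + 1) rest
    else pvRunScan v 1 rest

def pvSumB (dados_rolados : List Int) : Int :=
  dados_rolados.foldl (fun s v => s + v) 0

def calcula_pontos_quadra_alt (dados_rolados : List Int) : Int :=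
  match PySem.List.sorted dados_rolados (fun x => x) false with
  | [] => 0
  | h :: t => if pvRunScan h 1 t then pvSumB dados_rolados else 0

-- ===== PRECONDITION & SPEC =====
def Spec_calcula_pontos_quadra (dados_rolados : List Int) (out : Int) : Prop := out = calcula_pontos_quadra_alt dados_rolados
instance (dados_rolados : List Int) (out : Int) : Decidable (Spec_calcula_pontos_quadra dados_rolados out) := by unfold Spec_calcula_pontos_quadra; infer_instance

-- ===== CLAIM (what is proved, stated in full; the proofs are below) =====
def Claim_equal_calcula_pontos_quadra : Prop := ∀ (dados_rolados : List Int), Dom_calcula_pontos_quadra dados_rolados → Spec_calcula_pontos_quadra dados_rolados (calcula_pontos_quadra dados_rolados)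

-- ===== LEMMAS AND PROOFS =====

lemma count_cons_self (v : Int) (rest : List Int) : (v :: rest).count v = rest.count v + 1 := by
  simp

lemma count_cons_ne (v d : Int) (rest : List Int) (h : d ≠ v) :
    (v :: rest).count d = rest.count d := by
  have h' : ¬ v = d := fun hh => h hh.symm
  simp [List.count_cons, h']

lemma pvCountLoop_eq (xs : List Int) (d : Int) : pvCountLoop xs d = (xs.count d : Int) := by
  have aux : ∀ (ys : List Int) (c : Int),
      ys.foldl (fun contador v => if v == d then contador + 1 else contador) c
        = c + (ys.count d : Int) := by
    intro ys
    induction ys with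
    | nil => intro c; simp
    | cons v rest ih =>
      intro c
      rw [List.foldl_cons]
      by_cases h : v = d
      · rw [if_pos (by simp [h]), ih, List.count_cons, if_pos (by simp [h])]
        push_cast; ring
      · rw [if_neg (by simp [h]), ih, List.count_cons,
          if_neg (by simp [h])]
        simp
  simpa [pvCountLoop] using aux xs 0

lemma pvSum_eq (xs : List Int) : pvSumLoop xs = pvSumB xs := rfl

lemma pvAOuter_eq (xs : List Int) : ∀ ys : List Int,
    pvAOuter xs ys = if ∃ d ∈ ys, 4 ≤ xs.count d then pvSumLoop xs else 0 := by
  intro ys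
  induction ys with
  | nil => simp [pvAOuter]
  | cons d rest ih =>
    rw [pvAOuter, ih, pvCountLoop_eq]
    by_cases h : 4 ≤ xs.count d
    · have h' : (4 : Int) ≤ (xs.count d : Int) := by exact_mod_cast h
      simp [h, h', List.exists_mem_cons_iff]
    · have h' : ¬ (4 : Int) ≤ (xs.count d : Int) := by exact_mod_cast h
      simp [h, h', List.exists_mem_cons_iff]

lemma pvRunScan_iff : ∀ (l : List Int) (prev run : Int),
    l.Pairwise (· ≤ ·) → (∀ x ∈ l, prev ≤ x) → run ≤ 3 →
    (pvRunScan prev run l = true ↔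
      4 ≤ run + (l.count prev : Int) ∨ ∃ d ∈ l, d ≠ prev ∧ 4 ≤ (l.count d : Int)) := by
  intro l
  induction l with
  | nil => intro prev run _ _ hrun; simp [pvRunScan]; omega
  | cons v rest ih =>
    intro prev run hpw hlo hrun
    have hpw' : rest.Pairwise (· ≤ ·) := (List.pairwise_cons.mp hpw).2
    have hvle : ∀ x ∈ rest, v ≤ x := (List.pairwise_cons.mp hpw).1
    by_cases hv : v = prev
    · subst hv
      rw [pvRunScan]
      simp only [beq_self_eq_true, if_true]
      have hc : ((v :: rest).count v : Int) = (rest.count v : Int) + 1 := by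
        rw [count_cons_self]; push_cast; ring
      by_cases hge : (4 : Int) ≤ run + 1
      · simp only [hge, if_true]
        constructor
        · intro _
          left
          have h0 : (0 : Int) ≤ (rest.count v : Int) := by positivity
          omega
        · intro _; trivial
      · simp only [hge, if_false]
        rw [ih v (run + 1) hpw' hvle (by omega)]
        constructor
        · rintro (h1 | ⟨d, hd, hne, hcd⟩)
          · left; omega
          · right
            refine ⟨d, List.mem_cons_of_mem _ hd, hne, ?_⟩
            rw [count_cons_ne v d rest hne]; exact hcd
        · rintro (h1 | ⟨d, hd, hne, hcd⟩)
          · left; omega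
          · rcases List.mem_cons.mp hd with hdv | hdr
            · exact absurd hdv hne
            · right
              refine ⟨d, hdr, hne, ?_⟩
              rw [count_cons_ne v d rest hne] at hcd; exact hcd
    · have hlt : prev < v := lt_of_le_of_ne (hlo v (List.mem_cons_self)) (fun h => hv h.symm)
      have hnotmem : prev ∉ (v :: rest) := by
        intro hmem
        rcases List.mem_cons.mp hmem with h | h
        · exact absurd h.symm hv
        · exact absurd (hvle prev h) (not_le.mpr hlt)
      have hcz : (v :: rest).count prev = 0 := List.count_eq_zero.mpr hnotmem
      rw [pvRunScan, if_neg (by simpa using hv)]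
      rw [ih v 1 hpw' hvle (by omega)]
      have hnep : ∀ d ∈ (v :: rest), d ≠ prev := by
        intro d hd
        rcases List.mem_cons.mp hd with h | h
        · subst h; exact hv
        · intro he; subst he; exact absurd (hvle d h) (not_le.mpr hlt)
      constructor
      · rintro (h1 | ⟨d, hd, hne, hcd⟩)
        · right
          refine ⟨v, List.mem_cons_self, hv, ?_⟩
          have : ((v :: rest).count v : Int) = (rest.count v : Int) + 1 := by
            rw [count_cons_self]; push_cast; ring
          omega
        · right
          refine ⟨d, List.mem_cons_of_mem _ hd, hnep d (List.mem_cons_of_mem _ hd), ?_⟩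
          rw [count_cons_ne v d rest hne]; exact hcd
      · rintro (h1 | ⟨d, hd, _, hcd⟩)
        · rw [hcz] at h1; push_cast at h1; omega
        · by_cases hdveq : d = v
          · subst hdveq
            left
            have : ((d :: rest).count d : Int) = (rest.count d : Int) + 1 := by
              rw [count_cons_self]; push_cast; ring
            omega
          · rcases List.mem_cons.mp hd with hdv | hdr
            · exact absurd hdv hdveq
            · right
              refine ⟨d, hdr, hdveq, ?_⟩
              rw [count_cons_ne v d rest hdveq] at hcd; exact hcd

lemma alt_eq (xs : List Int) :
    calcula_pontos_quadra_alt xs = if ∃ d ∈ xs, 4 ≤ xs.count d then pvSumB xs else 0 := by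
  unfold calcula_pontos_quadra_alt
  cases hs : PySem.List.sorted xs (fun x => x) false with
  | nil =>
    have hx : xs = [] := (PySem.List.sorted_eq_nil_iff xs (fun x => x) false).mp hs
    subst hx; simp
  | cons h t =>
    have hperm : ((h :: t) : List Int).Perm xs := by
      rw [← hs]; exact PySem.List.sorted_perm xs (fun x => x) false
    have hpw : ((h :: t) : List Int).Pairwise (· ≤ ·) := by
      have := PySem.List.sorted_pairwise (xs := xs) (key := fun x => x)
      rw [hs] at this; exact this
    have hpc := List.pairwise_cons.mp hpw
    have hscan : pvRunScan h 1 t = true ↔ ∃ d ∈ xs, 4 ≤ xs.count d := by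
      rw [pvRunScan_iff t h 1 hpc.2 hpc.1 (by omega)]
      constructor
      · rintro (h1 | ⟨d, hd, hne, hcd⟩)
        · refine ⟨h, hperm.mem_iff.mp (List.mem_cons_self), ?_⟩
          rw [← hperm.count_eq]
          rw [count_cons_self] at *
          omega
        · refine ⟨d, hperm.mem_iff.mp (List.mem_cons_of_mem _ hd), ?_⟩
          rw [← hperm.count_eq]
          rw [count_cons_ne h d t hne]
          omega
      · rintro ⟨d, hd, hcd⟩
        have hd' : d ∈ (h :: t) := hperm.mem_iff.mpr hd
        have hcd' : (h :: t).count d = xs.count d := hperm.count_eq d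
        by_cases hdh : d = h
        · subst hdh
          left
          rw [count_cons_self] at hcd'
          omega
        · rcases List.mem_cons.mp hd' with h1 | h1
          · exact absurd h1 hdh
          · right
            refine ⟨d, h1, hdh, ?_⟩
            rw [count_cons_ne h d t hdh] at hcd'
            omega
    by_cases hq : ∃ d ∈ xs, 4 ≤ xs.count d
    · simp [hq, hscan.mpr hq]
    · have : pvRunScan h 1 t = false := by
        cases hb : pvRunScan h 1 t
        · rfl
        · exact absurd (hscan.mp hb) hq
      simp [hq, this]

-- ===== VERDICT (by name: the statement is the Claim_ definition above) =====
theorem calcula_pontos_quadra_spec : Claim_equal_calcula_pontos_quadra := by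
  intro xs _
  unfold Spec_calcula_pontos_quadra
  rw [alt_eq]
  unfold calcula_pontos_quadra
  rw [pvAOuter_eq, pvSum_eq]
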